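-- pv_equiv track=rewrite | github.com/tjvmarle/advent_of_code | Advent of Code - 2024/solved/4b/main.py | square_to_diamond
-- ===== SOURCE A (Python) =====
-- from typing import List
--
-- Grid = List[List[str]]
--
-- def square_to_diamond(square: Grid) -> Grid:
--     """Rotates a square grid 1/8 clockwise, turning it into a diamond.
--
--     Starting with:
--                                        1                                    1
--         1111                           21                                  2 1
--         2222                           321                                3 2 1
--         3333  --> expected result -->  4321  --> which is a diamond -->  4 3 2 1
--         4444                           432                                4 3 2
--                                        43                                  4 3
--                                        4                                    4
--
--     Strip the first column and append each value to a fresh list.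
--
--     Diamond:
--
--         1 <-- start
--         2
--         3
--         4
--         []  <-- Empty lists (for now)
--         []
--         []
--
--     Strip the next column from the input and append it to the diamond, but increase the row offset by one. Repeat.
--     Every latest entry is enclosed in single quotes for clarity.
--
--     Diamond:
--
--         1                   1                    1
--         2(1)  <-- start     2 1                  2 1
--         3(2)                3 2(1)  <-- start    3 2 1
--         4(3)                4 3(2)               4 3 2(1)  <-- start
--        (4)    -->           4(3)   -->           4 3(2)
--         []                 (4)                   4(3)
--         []                  []                  (4)
--     """
--
--     diamond_length = len(square) * 2 - 1  # E.g. a 3x3 square creates a 5 row diamond.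
--     diamond = [[] for _ in range(diamond_length)]  # Since we'll only append, we need empty placeholders.
--
--     quart_grid = list(zip(*square))  # This just changes columns to rows, since we'll need to strip the columns.
--     for row_cnt, row in enumerate(quart_grid):
--         for char_cnt, char in enumerate(row):
--             diamond[row_cnt + char_cnt].append(char)
--
--     return diamond
-- ===== SOURCE B (Python) =====
-- from typing import List
--
-- Grid = List[List[str]]
--
-- def square_to_diamond(square: Grid) -> Grid:
--     """Build each diamond row directly by gathering the anti-diagonal d
--     (cells square[d-c][c] in order of increasing column c)."""
--     n = len(square)
--     if n == 0:
--         return []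
--     m = min(len(row) for row in square)
--     return [[square[d - c][c] for c in range(max(0, d - n + 1), min(d, m - 1) + 1)]
--             for d in range(2 * n - 1)]
-- ===== Notes on version B (the rewrite author's own statement) =====
-- stated objective: alternative
-- what changed: Instead of transposing the grid with zip and scattering each cell into diamond[row+col] via appends, B builds each diamond row directly by gathering the anti-diagonal d as [square[d-c][c] for c in the valid column range] in one comprehension.
import Mathlib
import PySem

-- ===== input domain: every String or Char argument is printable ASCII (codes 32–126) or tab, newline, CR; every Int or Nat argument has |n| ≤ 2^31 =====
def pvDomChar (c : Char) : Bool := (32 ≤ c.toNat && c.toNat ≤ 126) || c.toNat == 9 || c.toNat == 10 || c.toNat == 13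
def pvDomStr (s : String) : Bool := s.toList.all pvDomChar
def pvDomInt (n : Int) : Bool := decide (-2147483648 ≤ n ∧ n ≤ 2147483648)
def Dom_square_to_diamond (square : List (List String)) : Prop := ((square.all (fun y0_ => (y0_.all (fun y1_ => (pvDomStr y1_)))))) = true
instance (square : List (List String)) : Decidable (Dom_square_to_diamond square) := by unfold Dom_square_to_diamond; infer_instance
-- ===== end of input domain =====

-- B gathers each anti-diagonal of the grid directly instead of A's transpose-and-scatter; return values only.

-- ===== PORT A =====
-- zip(*square): truncates at the shortest row; fuel = first row's length suffices (zip stops once a row is exhausted)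
def pvZipStarGo : Nat → List (List String) → List (List String)
  | 0, _ => []
  | k + 1, rows =>
    if rows.any (fun r => r.isEmpty) then []
    else rows.map (fun r => r.headD "") :: pvZipStarGo k (rows.map (fun r => r.tail))

def pvZipStar (rows : List (List String)) : List (List String) :=
  pvZipStarGo (rows.headD []).length rows

def square_to_diamond (square : List (List String)) : List (List String) :=
  let diamondLength : Int := PySem.List.len square * 2 - 1
  let diamond : List (List String) := (PySem.List.pyRange 0 diamondLength 1).map (fun _ => [])
  let quartGrid := pvZipStar square
  (PySem.List.enumerate quartGrid 0).foldl
    (fun diamond rc =>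
      (PySem.List.enumerate rc.2 0).foldl
        (fun diamond cc =>
          PySem.List.pySetD diamond (rc.1 + cc.1)
            (PySem.List.pyGetD diamond (rc.1 + cc.1) [] ++ [cc.2])) diamond)
    diamond

-- ===== PORT B =====
def square_to_diamond_alt (square : List (List String)) : List (List String) :=
  let n : Int := PySem.List.len square
  if n = 0 then []
  else
    let m : Int := (PySem.List.min? (square.map (fun r => PySem.List.len r)) (fun y => y)).getD 0
    (PySem.List.pyRange 0 (2 * n - 1) 1).map (fun d =>
      (PySem.List.pyRange (max 0 (d - n + 1)) (min d (m - 1) + 1) 1).map (fun c =>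
        PySem.List.pyGetD (PySem.List.pyGetD square (d - c) []) c ""))

-- ===== PRECONDITION & SPEC =====
-- Pre_ excludes exactly the inputs on which A raises IndexError: a non-empty grid all of whose
-- rows are longer than len(square) (zip then yields more columns than the diamond has rows).
def Pre_square_to_diamond (square : List (List String)) : Prop :=
  square = [] ∨ ∃ r ∈ square, r.length ≤ square.length
instance (square : List (List String)) : Decidable (Pre_square_to_diamond square) := by
  unfold Pre_square_to_diamond; infer_instance

def pvWitness_square_to_diamond : List (List String) := [["a", "b"], ["c", "d"]]

def Spec_square_to_diamond (square : List (List String)) (out : List (List String)) : Prop :=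
  out = square_to_diamond_alt square
instance (square : List (List String)) (out : List (List String)) : Decidable (Spec_square_to_diamond square out) := by
  unfold Spec_square_to_diamond; infer_instance

-- ===== CLAIM (what is proved, stated in full; the proofs are below) =====
def Claim_equal_square_to_diamond : Prop :=
  ∀ (square : List (List String)), Dom_square_to_diamond square →
    Pre_square_to_diamond square → Spec_square_to_diamond square (square_to_diamond square)

-- ===== LEMMAS AND PROOFS =====

-- minimum row length of the grid (the number of columns zip keeps)
def pvMinLen (square : List (List String)) : Nat :=
  match square with
  | [] => 0
  | r :: rest => (rest.map List.length).foldl min r.length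

-- the anti-diagonal d gathered from the first k columns (A's append order: increasing column)
def pvGather (square : List (List String)) (d k : Nat) : List String :=
  ((List.range k).filter (fun c => decide (c ≤ d ∧ d - c < square.length))).map
    (fun c => (square.getD (d - c) []).getD c "")

lemma pv_foldl_min_le (t : List Nat) (a : Nat) :
    t.foldl min a ≤ a ∧ ∀ y ∈ t, t.foldl min a ≤ y := by
  induction t generalizing a with
  | nil => simp
  | cons x t ih =>
    have h := ih (min a x)
    refine ⟨le_trans h.1 (min_le_left _ _), ?_⟩
    intro y hy
    rcases List.mem_cons.1 hy with rfl | hy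
    · exact le_trans h.1 (min_le_right _ _)
    · exact h.2 y hy

lemma pv_le_foldl_min (t : List Nat) (a c : Nat) (ha : c ≤ a) (ht : ∀ y ∈ t, c ≤ y) :
    c ≤ t.foldl min a := by
  induction t generalizing a with
  | nil => simpa using ha
  | cons x t ih =>
    exact ih (min a x) (le_min ha (ht x (by simp))) (fun y hy => ht y (by simp [hy]))

lemma pvMinLen_le (square : List (List String)) (r : List String) (hr : r ∈ square) :
    pvMinLen square ≤ r.length := by
  match square with
  | [] => cases hr
  | r0 :: rest =>
    rcases List.mem_cons.1 hr with rfl | hr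
    · exact (pv_foldl_min_le _ _).1
    · exact (pv_foldl_min_le (rest.map List.length) r0.length).2 _ (List.mem_map_of_mem hr)

lemma pv_foldl_min_sub (t : List Nat) (a : Nat) :
    (t.map (fun x => x - 1)).foldl min (a - 1) = t.foldl min a - 1 := by
  induction t generalizing a with
  | nil => simp
  | cons x t ih =>
    simp only [List.map_cons, List.foldl_cons]
    rw [show min (a - 1) (x - 1) = min a x - 1 by omega]
    exact ih (min a x)

lemma pvMinLen_tail (rows : List (List String)) :
    pvMinLen (rows.map (fun r => r.tail)) = pvMinLen rows - 1 := by
  match rows with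
  | [] => simp [pvMinLen]
  | r :: rest =>
    simp only [List.map_cons, pvMinLen, List.map_map, List.length_tail]
    have h : (List.length ∘ fun r : List String => r.tail) = (fun x => x - 1) ∘ List.length := by
      funext r; simp [List.length_tail]
    rw [h, ← List.map_map]
    exact pv_foldl_min_sub (rest.map List.length) r.length

lemma pvZipStarGo_spec (fuel : Nat) :
    ∀ (rows : List (List String)), rows ≠ [] → pvMinLen rows ≤ fuel →
      pvZipStarGo fuel rows
        = (List.range (pvMinLen rows)).map (fun i => rows.map (fun r => r.getD i "")) := by
  induction fuel with
  | zero =>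
    intro rows _ hle
    have : pvMinLen rows = 0 := Nat.le_zero.1 hle
    simp [pvZipStarGo, this]
  | succ k ih =>
    intro rows hne hle
    by_cases hany : rows.any (fun r => r.isEmpty) = true
    · obtain ⟨r, hr, hre⟩ := List.any_eq_true.1 hany
      have hr0 : r.length = 0 := by simpa [List.isEmpty_iff] using hre
      have : pvMinLen rows = 0 := by
        have := pvMinLen_le rows r hr; omega
      simp [pvZipStarGo, hany, this]
    · have hall : ∀ r ∈ rows, r ≠ [] := by
        intro r hr hcon
        exact hany (List.any_eq_true.2 ⟨r, hr, by simp [hcon]⟩)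
      have hpos : 1 ≤ pvMinLen rows := by
        match rows, hne with
        | r :: rest, _ =>
          apply pv_le_foldl_min
          · exact List.length_pos_of_ne_nil (hall r (by simp))
          · intro y hy
            obtain ⟨r', hr', rfl⟩ := List.mem_map.1 hy
            exact List.length_pos_of_ne_nil (hall r' (by simp [hr']))
      have hne' : rows.map (fun r => r.tail) ≠ [] := by
        simpa using hne
      have hle' : pvMinLen (rows.map (fun r => r.tail)) ≤ k := by
        rw [pvMinLen_tail]; omega
      rw [Bool.not_eq_true] at hany
      rw [show pvZipStarGo (k + 1) rows
            = rows.map (fun r => r.headD "") :: pvZipStarGo k (rows.map (fun r => r.tail)) from by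
          simp [pvZipStarGo, hany]]
      rw [ih _ hne' hle', pvMinLen_tail]
      rw [show pvMinLen rows = (pvMinLen rows - 1) + 1 by omega, List.range_succ_eq_map]
      simp only [List.map_cons, List.map_map, Nat.add_sub_cancel]
      refine congrArg₂ List.cons ?_ ?_
      · apply List.map_congr_left
        intro r hr
        match r, hall r hr with
        | x :: t, _ => simp
      · apply List.map_congr_left
        intro i _
        apply List.map_congr_left
        intro r hr
        match r, hall r hr with
        | x :: t, _ => simp [Function.comp]

lemma pvZipStar_spec (square : List (List String)) (hne : square ≠ []) :
    pvZipStar square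
      = (List.range (pvMinLen square)).map (fun i => square.map (fun r => r.getD i "")) := by
  unfold pvZipStar
  apply pvZipStarGo_spec _ _ hne
  match square with
  | r :: rest => exact pvMinLen_le (r :: rest) r (by simp)

lemma pv_enumerate_range_map {α : Type} (f : Nat → α) (k : Nat) :
    PySem.List.enumerate ((List.range k).map f) 0
      = (List.range k).map (fun (i : Nat) => ((i : Int), f i)) := by
  induction k with
  | zero => simp [PySem.List.enumerate_nil]
  | succ k ih =>
    rw [List.range_succ, List.map_append, List.map_append,
      PySem.List.enumerate_append, ih]
    simp [PySem.List.enumerate_cons, PySem.List.enumerate_nil]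

lemma pv_inner_spec (row : List String) :
    ∀ (s i : Nat) (dm : List (List String)), i + s + row.length ≤ dm.length →
      (((PySem.List.enumerate row ((s : Nat) : Int)).foldl
          (fun dm cc =>
            PySem.List.pySetD dm ((i : Int) + cc.1)
              (PySem.List.pyGetD dm ((i : Int) + cc.1) [] ++ [cc.2])) dm).length = dm.length) ∧
      (∀ d, d < dm.length →
        ((PySem.List.enumerate row ((s : Nat) : Int)).foldl
            (fun dm cc =>
              PySem.List.pySetD dm ((i : Int) + cc.1)
                (PySem.List.pyGetD dm ((i : Int) + cc.1) [] ++ [cc.2])) dm).getD d []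
          = dm.getD d [] ++
            (if i + s ≤ d ∧ d < i + s + row.length then [row.getD (d - (i + s)) ""] else [])) := by
  induction row with
  | nil =>
    intro s i dm _
    refine ⟨by simp [PySem.List.enumerate_nil], ?_⟩
    intro d hd
    simp only [PySem.List.enumerate_nil, List.foldl_nil, List.length_nil]
    rw [if_neg (by omega)]
    simp
  | cons x row ih =>
    intro s i dm hlen
    rw [PySem.List.enumerate_cons]
    have hc : (i : Int) + (s : Int) = ((i + s : Nat) : Int) := by push_cast; ring
    have hsc : ((s : Nat) : Int) + 1 = (((s + 1 : Nat)) : Int) := by push_cast; ring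
    simp only [List.foldl_cons, hc, hsc, PySem.List.pySetD_natCast, PySem.List.pyGetD_natCast]
    set dm1 := dm.set (i + s) (dm.getD (i + s) [] ++ [x]) with hdm1
    have hlen1 : dm1.length = dm.length := by simp [hdm1]
    have hlen' : i + (s + 1) + row.length ≤ dm1.length := by
      rw [hlen1]; simp only [List.length_cons] at hlen; omega
    obtain ⟨ihlen, ihget⟩ := ih (s + 1) i dm1 hlen'
    refine ⟨by rw [ihlen, hlen1], ?_⟩
    intro d hd
    rw [ihget d (by omega)]
    have hdm1d : dm1.getD d [] = if d = i + s then dm.getD d [] ++ [x] else dm.getD d [] := by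
      by_cases hds : d = i + s
      · rw [if_pos hds, hdm1, hds, List.getD_eq_getElem?_getD, List.getElem?_set_self (by omega),
          Option.getD_some, List.getD_eq_getElem?_getD]
      · rw [if_neg hds, hdm1, List.getD_eq_getElem?_getD, List.getElem?_set_ne (by omega),
          List.getD_eq_getElem?_getD]
    rw [hdm1d]
    by_cases hds : d = i + s
    · rw [if_pos hds, if_neg (by omega), if_pos (by simp only [List.length_cons]; omega)]
      have he : d - (i + s) = 0 := by omega
      simp [he]
    · rw [if_neg hds]
      by_cases hin : i + (s + 1) ≤ d ∧ d < i + (s + 1) + row.length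
      · rw [if_pos hin, if_pos (by simp only [List.length_cons]; omega)]
        have he : d - (i + s) = (d - (i + (s + 1))) + 1 := by omega
        simp [he]
      · rw [if_neg hin, if_neg (by simp only [List.length_cons]; omega)]

lemma pvGather_succ (square : List (List String)) (d k : Nat) :
    pvGather square d (k + 1)
      = pvGather square d k ++
        (if k ≤ d ∧ d - k < square.length
         then [(square.getD (d - k) []).getD k ""] else []) := by
  unfold pvGather
  rw [List.range_succ, List.filter_append, List.map_append]
  by_cases h : k ≤ d ∧ d - k < square.length
  · rw [if_pos h]
    simp [h]
  · rw [if_neg h]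
    simp only [List.filter_cons, List.filter_nil]
    rw [decide_eq_false h]
    simp

lemma pv_outer_spec (square : List (List String)) (hmn : pvMinLen square ≤ square.length) :
    ∀ k, k ≤ pvMinLen square →
      ((((List.range k).map (fun (i : Nat) => ((i : Int), square.map (fun r => r.getD i "")))).foldl
          (fun diamond rc =>
            (PySem.List.enumerate rc.2 0).foldl
              (fun diamond cc =>
                PySem.List.pySetD diamond (rc.1 + cc.1)
                  (PySem.List.pyGetD diamond (rc.1 + cc.1) [] ++ [cc.2])) diamond)
          (List.replicate (2 * square.length - 1) [])).length = 2 * square.length - 1) ∧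
      (∀ d, d < 2 * square.length - 1 →
        (((List.range k).map (fun (i : Nat) => ((i : Int), square.map (fun r => r.getD i "")))).foldl
            (fun diamond rc =>
              (PySem.List.enumerate rc.2 0).foldl
                (fun diamond cc =>
                  PySem.List.pySetD diamond (rc.1 + cc.1)
                    (PySem.List.pyGetD diamond (rc.1 + cc.1) [] ++ [cc.2])) diamond)
            (List.replicate (2 * square.length - 1) [])).getD d []
          = pvGather square d k) := by
  intro k
  induction k with
  | zero =>
    intro _
    refine ⟨by simp, ?_⟩
    intro d hd
    simp [pvGather, List.getD_eq_getElem?_getD, hd]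
  | succ k ih =>
    intro hk
    obtain ⟨ihlen, ihget⟩ := ih (by omega)
    rw [List.range_succ, List.map_append, List.foldl_append]
    set dmk := (((List.range k).map (fun (i : Nat) => ((i : Int), square.map (fun r => r.getD i "")))).foldl
          (fun diamond rc =>
            (PySem.List.enumerate rc.2 0).foldl
              (fun diamond cc =>
                PySem.List.pySetD diamond (rc.1 + cc.1)
                  (PySem.List.pyGetD diamond (rc.1 + cc.1) [] ++ [cc.2])) diamond)
          (List.replicate (2 * square.length - 1) [])) with hdmk
    simp only [List.map_cons, List.map_nil, List.foldl_cons, List.foldl_nil]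
    have hrowlen : (square.map (fun r => r.getD k "")).length = square.length := by simp
    have hn1 : 1 ≤ square.length := by omega
    have hbound : k + 0 + (square.map (fun r => r.getD k "")).length ≤ dmk.length := by
      rw [hrowlen, ihlen]; omega
    have h0 : ((0 : Nat) : Int) = (0 : Int) := by norm_num
    obtain ⟨ilen, iget⟩ := pv_inner_spec (square.map (fun r => r.getD k "")) 0 k dmk hbound
    rw [h0] at ilen iget
    refine ⟨by rw [ilen, ihlen], ?_⟩
    intro d hd
    rw [iget d (by omega), ihget d hd, pvGather_succ]
    congr 1
    rw [hrowlen]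
    by_cases h : k ≤ d ∧ d - k < square.length
    · rw [if_pos (by omega), if_pos h]
      have hdk : d - (k + 0) = d - k := by omega
      rw [hdk, List.getD_eq_getElem?_getD, List.getElem?_map,
        List.getElem?_eq_getElem (l := square) (by omega)]
      simp [List.getD_eq_getElem?_getD, List.getElem?_eq_getElem (l := square) (by omega : d - k < square.length)]
    · rw [if_neg (by omega), if_neg h]

lemma pv_filter_interval (a b : Nat) :
    ∀ (M : Nat), (List.range M).filter (fun c => decide (a ≤ c ∧ c < b))
      = (List.range (min b M - a)).map (fun k => a + k) := by
  intro M
  induction M with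
  | zero => simp
  | succ M ih =>
    rw [List.range_succ, List.filter_append, ih]
    simp only [List.filter_cons, List.filter_nil]
    by_cases h : a ≤ M ∧ M < b
    · rw [decide_eq_true h]
      have h1 : min b (M + 1) - a = (min b M - a) + 1 := by omega
      have h2 : min b M - a = M - a := by omega
      rw [h1, List.range_succ, List.map_append]
      simp [h2, show a + (M - a) = M by omega]
    · rw [decide_eq_false h]
      have : min b (M + 1) - a = min b M - a := by omega
      simp [this]

lemma pv_foldl_min_cast (t : List Nat) : ∀ (a : Nat),
    (t.map (fun x => ((x : Nat) : Int))).foldl min ((a : Nat) : Int)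
      = ((t.foldl min a : Nat) : Int) := by
  induction t with
  | nil => intro a; simp
  | cons x t ih =>
    intro a
    simp only [List.map_cons, List.foldl_cons]
    rw [show min ((a : Nat) : Int) ((x : Nat) : Int) = ((min a x : Nat) : Int) by
      simp [Nat.cast_min], ih]

lemma pv_min_cast (square : List (List String)) (hne : square ≠ []) :
    PySem.List.min? (square.map (fun r => ((r.length : Nat) : Int))) (fun y => y)
      = some ((pvMinLen square : Nat) : Int) := by
  match square with
  | r :: rest =>
    simp only [List.map_cons, PySem.List.min?_id_cons, pvMinLen]
    congr 1
    rw [show (rest.map fun r => ((r.length : Nat) : Int))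
          = (rest.map List.length).map (fun x => ((x : Nat) : Int)) by simp [List.map_map]]
    exact pv_foldl_min_cast (rest.map List.length) r.length

lemma pv_bentry (square : List (List String)) (d : Nat)
    (hn : 1 ≤ square.length) (hmn : pvMinLen square ≤ square.length) :
    (PySem.List.pyRange (max 0 ((d : Int) - (square.length : Int) + 1))
        (min (d : Int) (((pvMinLen square : Nat) : Int) - 1) + 1) 1).map
      (fun c => PySem.List.pyGetD (PySem.List.pyGetD square ((d : Int) - c) []) c "")
      = pvGather square d (pvMinLen square) := by
  set n := square.length with hn'
  set m := pvMinLen square with hm'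
  have hlo : max 0 ((d : Int) - (n : Int) + 1) = (((d + 1 - n : Nat)) : Int) := by
    rw [max_def]; split_ifs <;> [skip; skip] <;> omega
  have hhi : min (d : Int) (((m : Nat) : Int) - 1) + 1 = ((min (d + 1) m : Nat) : Int) := by
    rw [min_def]; split_ifs <;> push_cast <;> omega
  rw [hlo, hhi, PySem.List.pyRange_one]
  have hcnt : ((((min (d + 1) m : Nat)) : Int) - (((d + 1 - n : Nat)) : Int)).toNat
      = min (d + 1) m - (d + 1 - n) := by omega
  rw [hcnt]
  unfold pvGather
  rw [List.filter_congr (q := fun c => decide ((d + 1 - n) ≤ c ∧ c < d + 1))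
      (by intro c _; simp only [decide_eq_decide]; omega),
    pv_filter_interval (d + 1 - n) (d + 1) m, List.map_map, List.map_map]
  apply List.map_congr_left
  intro k hk
  rw [List.mem_range] at hk
  have hc : d + 1 - n + k ≤ d := by omega
  have h1 : (((d + 1 - n : Nat)) : Int) + ((k : Nat) : Int) = (((d + 1 - n + k : Nat)) : Int) := by
    push_cast; ring
  have h2 : (d : Int) - (((d + 1 - n + k : Nat)) : Int) = (((d - (d + 1 - n + k) : Nat)) : Int) := by
    omega
  simp only [Function.comp, h1, h2, PySem.List.pyGetD_natCast]

-- ===== VERDICT (by name: the statement is the Claim_ definition above) =====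
theorem square_to_diamond_spec : Claim_equal_square_to_diamond := by
  intro square _ hpre
  unfold Spec_square_to_diamond
  match square with
  | [] => rfl
  | r :: rest =>
    set square := r :: rest with hsq
    have hne : square ≠ [] := by simp [hsq]
    have hn : 1 ≤ square.length := by simp [hsq]
    have hmn : pvMinLen square ≤ square.length := by
      rcases hpre with h | ⟨r', hr', hr'len⟩
      · exact absurd h hne
      · exact le_trans (pvMinLen_le square r' hr') hr'len
    -- A side
    unfold square_to_diamond
    simp only [PySem.List.len_eq]
    have hdlen : ((square.length : Int) * 2 - 1) = ((2 * square.length - 1 : Nat) : Int) := by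
      omega
    have hD0 : (PySem.List.pyRange 0 ((square.length : Int) * 2 - 1) 1).map
          (fun _ => ([] : List String)) = List.replicate (2 * square.length - 1) [] := by
      rw [hdlen, PySem.List.pyRange_one,
        show ((((2 * square.length - 1 : Nat) : Int)) - 0).toNat = 2 * square.length - 1 by omega,
        List.map_map]
      simp only [Function.comp_def]
      rw [List.map_const', List.length_range]
    rw [hD0, pvZipStar_spec square hne, pv_enumerate_range_map]
    obtain ⟨hlenA, hgetA⟩ := pv_outer_spec square hmn (pvMinLen square) le_rfl
    -- B side
    unfold square_to_diamond_alt
    simp only [PySem.List.len_eq]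
    rw [if_neg (by omega), pv_min_cast square hne, Option.getD_some]
    rw [show (2 * (square.length : Int) - 1) = ((2 * square.length - 1 : Nat) : Int) by omega,
      PySem.List.pyRange_one,
      show (((2 * square.length - 1 : Nat) : Int) - 0).toNat = 2 * square.length - 1 by omega,
      List.map_map]
    apply List.ext_getElem
    · rw [hlenA, List.length_map, List.length_range]
    · intro i h1 h2
      rw [List.getElem_map, List.getElem_range]
      have hi : i < 2 * square.length - 1 := by simpa using h2
      have := hgetA i hi
      rw [List.getD_eq_getElem?_getD, List.getElem?_eq_getElem h1, Option.getD_some] at this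
      rw [this]
      have hb := pv_bentry square i hn hmn
      rw [← hb]
      simp only [Function.comp, zero_add]
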